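-- pv_equiv track=rewrite | github.com/SaskiaBublitz/modOpt | modOpt/constraints/parallelization.py | get_index_of_boxes_for_reduction
-- ===== SOURCE A (Python) =====
-- def get_index_of_boxes_for_reduction(xSolved, xAlmostEqual, maxBoxNo):
--     """ creates list for all boxes that can still be reduced
--     Args:
--         :xAlmostEqual:      list with boolean that is true for complete boxes
--         :maxBoxNo:          integer with current maximum number of boxes
--
--     Return:
--         :ready_for_reduction:   list with boolean that is true if box is ready
--                                 for reduction
--
--     """
--     complete = []
--     incomplete = []
--     solved =[]
--     not_solved_but_complete=[]
--     ready_for_reduction = len(xAlmostEqual) * [False]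
--
--     for i, val in enumerate(xSolved):
--         if val: solved +=[i]
--
--     for i,val in enumerate(xAlmostEqual):
--         if val:
--             complete += [i]
--             if not i in solved: not_solved_but_complete +=[i]
--         else: incomplete += [i]
--
--     nl = max(0, min(len(not_solved_but_complete), maxBoxNo - len(xAlmostEqual)))
--
--     for i in range(nl): ready_for_reduction[not_solved_but_complete[i]] = True
--     for i in incomplete: ready_for_reduction[i] = True
--
--     return ready_for_reduction
-- ===== SOURCE B (Python) =====
-- def get_index_of_boxes_for_reduction(xSolved, xAlmostEqual, maxBoxNo):
--     budget = max(0, maxBoxNo - len(xAlmostEqual))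
--     ready = []
--     for i, val in enumerate(xAlmostEqual):
--         if not val:
--             ready.append(True)
--         elif (i >= len(xSolved) or not xSolved[i]) and budget > 0:
--             ready.append(True)
--             budget -= 1
--         else:
--             ready.append(False)
--     return ready
-- ===== Notes on version B (the rewrite author's own statement) =====
-- stated objective: faster
-- what changed: Replaces A's five passes (solved/complete/incomplete index lists with an O(n) 'in solved' membership scan, then two marking loops over a preallocated list) by one left-to-right pass that appends each flag directly, consuming a precomputed budget counter for complete-unsolved boxes.
import Mathlib
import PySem

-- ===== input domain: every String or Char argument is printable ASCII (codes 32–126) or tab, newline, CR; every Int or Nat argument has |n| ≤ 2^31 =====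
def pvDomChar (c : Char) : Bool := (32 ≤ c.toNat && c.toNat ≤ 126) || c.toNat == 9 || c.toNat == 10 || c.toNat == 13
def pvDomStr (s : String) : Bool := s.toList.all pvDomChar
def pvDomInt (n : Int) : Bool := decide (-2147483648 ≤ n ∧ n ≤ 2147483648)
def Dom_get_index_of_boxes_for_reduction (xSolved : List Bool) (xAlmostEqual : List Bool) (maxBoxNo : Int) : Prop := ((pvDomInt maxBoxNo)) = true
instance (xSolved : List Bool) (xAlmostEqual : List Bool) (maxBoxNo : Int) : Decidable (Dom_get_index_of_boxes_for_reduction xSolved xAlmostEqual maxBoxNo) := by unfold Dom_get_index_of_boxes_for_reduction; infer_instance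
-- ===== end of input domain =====

-- B fuses A's five passes (index-list building with a linear 'in solved' scan, plus two marking loops)
-- into one budget-driven left-to-right pass; equivalence of return values is proved on all inputs.


-- ===== PORT A =====
-- 'for i, val in enumerate(xSolved): if val: solved += [i]' — appending in index order = cons recursion
def aSolved : List Bool → Nat → List Nat
  | [], _ => []
  | v :: rest, i => if v then i :: aSolved rest (i + 1) else aSolved rest (i + 1)

-- second loop of A: returns (complete, not_solved_but_complete, incomplete), each built in index order
def aScan (solved : List Nat) : List Bool → Nat → List Nat × List Nat × List Nat
  | [], _ => ([], [], [])
  | v :: rest, i =>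
    let r := aScan solved rest (i + 1)
    if v then (i :: r.1, if i ∈ solved then r.2.1 else i :: r.2.1, r.2.2)
    else (r.1, r.2.1, i :: r.2.2)

def get_index_of_boxes_for_reduction (xSolved : List Bool) (xAlmostEqual : List Bool) (maxBoxNo : Int) : List Bool :=
  let ready0 := List.replicate xAlmostEqual.length false
  let solved := aSolved xSolved 0
  let r := aScan solved xAlmostEqual 0
  let nsbc := r.2.1
  let incomplete := r.2.2
  let nl : Int := max 0 (min (nsbc.length : Int) (maxBoxNo - (xAlmostEqual.length : Int)))
  -- nl ≥ 0, so Python's range(nl) is List.range nl.toNat; nsbc[i] is in range for i < nl, so getD is exact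
  let ready1 := (List.range nl.toNat).foldl (fun rd i => rd.set (nsbc.getD i 0) true) ready0
  incomplete.foldl (fun rd i => rd.set i true) ready1

-- ===== PORT B =====
-- B's single pass: i = current index, budget = remaining budget, list = remaining suffix of xAlmostEqual
def altGo (xS : List Bool) : Nat → Int → List Bool → List Bool
  | _, _, [] => []
  | i, budget, v :: rest =>
    if !v then true :: altGo xS (i + 1) budget rest
    else if (decide (xS.length ≤ i) || !(xS.getD i false)) && decide (0 < budget) then
      true :: altGo xS (i + 1) (budget - 1) rest
    else false :: altGo xS (i + 1) budget rest

def get_index_of_boxes_for_reduction_alt (xSolved : List Bool) (xAlmostEqual : List Bool) (maxBoxNo : Int) : List Bool :=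
  altGo xSolved 0 (max 0 (maxBoxNo - (xAlmostEqual.length : Int))) xAlmostEqual

-- ===== PRECONDITION & SPEC =====
def Spec_get_index_of_boxes_for_reduction (xSolved : List Bool) (xAlmostEqual : List Bool) (maxBoxNo : Int) (out : List Bool) : Prop := out = get_index_of_boxes_for_reduction_alt xSolved xAlmostEqual maxBoxNo
instance (xSolved : List Bool) (xAlmostEqual : List Bool) (maxBoxNo : Int) (out : List Bool) : Decidable (Spec_get_index_of_boxes_for_reduction xSolved xAlmostEqual maxBoxNo out) := by unfold Spec_get_index_of_boxes_for_reduction; infer_instance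

-- ===== CLAIM (what is proved, stated in full; the proofs are below) =====
def Claim_equal_get_index_of_boxes_for_reduction : Prop := ∀ (xSolved : List Bool) (xAlmostEqual : List Bool) (maxBoxNo : Int), Dom_get_index_of_boxes_for_reduction xSolved xAlmostEqual maxBoxNo → Spec_get_index_of_boxes_for_reduction xSolved xAlmostEqual maxBoxNo (get_index_of_boxes_for_reduction xSolved xAlmostEqual maxBoxNo)

-- ===== LEMMAS AND PROOFS =====

-- "complete and unsolved" predicate, its prefix count, and the budget, all as functions of the inputs
def cuB (xS xAE : List Bool) (j : Nat) : Bool := xAE.getD j false && !(xS.getD j false)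
def cnt (xS xAE : List Bool) (j : Nat) : Nat := (List.range j).countP (cuB xS xAE)
def bud (xAE : List Bool) (maxBoxNo : Int) : Nat := (maxBoxNo - (xAE.length : Int)).toNat
-- the common reference value of both programs at index j
def fRef (xS xAE : List Bool) (maxBoxNo : Int) (j : Nat) : Bool :=
  !(xAE.getD j false) || (cuB xS xAE j && decide (cnt xS xAE j < bud xAE maxBoxNo))

-- generic "indices i, i+1, … of l whose (index, value) satisfy p"
def idxF (p : Nat → Bool → Bool) : List Bool → Nat → List Nat
  | [], _ => []
  | v :: rest, i => if p i v then i :: idxF p rest (i + 1) else idxF p rest (i + 1)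

theorem idxF_eq (p : Nat → Bool → Bool) : ∀ (l : List Bool) (i : Nat),
    idxF p l i = ((List.range l.length).filter (fun k => p (i + k) (l.getD k false))).map (fun k => i + k) := by
  intro l
  induction l with
  | nil => intro i; simp [idxF]
  | cons v rest ih =>
    intro i
    have hq : List.filter ((fun k => p (i + k) ((v :: rest).getD k false)) ∘ Nat.succ) (List.range rest.length)
        = List.filter (fun k => p (i + 1 + k) (rest.getD k false)) (List.range rest.length) := by
      apply List.filter_congr
      intro k _
      show p (i + Nat.succ k) ((v :: rest).getD (Nat.succ k) false) = p (i + 1 + k) (rest.getD k false)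
      rw [show i + Nat.succ k = i + 1 + k from by omega, List.getD_cons_succ]
    have hm : ∀ (L : List Nat), List.map (fun k => i + k) (List.map Nat.succ L)
        = List.map (fun k => i + 1 + k) L := by
      intro L; rw [List.map_map]; apply List.map_congr_left; intro k _
      show i + Nat.succ k = i + 1 + k
      omega
    rw [idxF, List.length_cons, List.range_succ_eq_map, List.filter_cons, List.filter_map, hq, ih]
    by_cases hv : p i v <;> simp [hv, hm]

theorem aSolved_eq_idxF : ∀ (l : List Bool) (i : Nat), aSolved l i = idxF (fun _ v => v) l i := by
  intro l; induction l with
  | nil => intro i; rfl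
  | cons v rest ih => intro i; simp [aSolved, idxF, ih]

theorem mem_idxF (p : Nat → Bool → Bool) (l : List Bool) (i j : Nat) :
    j ∈ idxF p l i ↔ i ≤ j ∧ j - i < l.length ∧ p j (l.getD (j - i) false) = true := by
  rw [idxF_eq]
  simp only [List.mem_map, List.mem_filter, List.mem_range]
  constructor
  · rintro ⟨k, ⟨hk, hp⟩, rfl⟩
    refine ⟨by omega, by omega, ?_⟩
    simpa [Nat.add_sub_cancel_left] using hp
  · rintro ⟨h1, h2, h3⟩
    exact ⟨j - i, ⟨h2, by rwa [Nat.add_sub_cancel' h1]⟩, Nat.add_sub_cancel' h1⟩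

theorem mem_aSolved (xS : List Bool) (j : Nat) : j ∈ aSolved xS 0 ↔ xS.getD j false = true := by
  rw [aSolved_eq_idxF, mem_idxF]
  constructor
  · rintro ⟨-, -, h⟩; simpa using h
  · intro h
    have hlt : j < xS.length := by
      by_contra hge
      rw [List.getD_eq_default] at h
      · exact absurd h (by simp)
      · omega
    exact ⟨Nat.zero_le _, by simpa using hlt, by simpa using h⟩

theorem aScan_nsbc (solved : List Nat) : ∀ (l : List Bool) (i : Nat),
    (aScan solved l i).2.1 = idxF (fun k v => v && !(decide (k ∈ solved))) l i := by
  intro l; induction l with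
  | nil => intro i; rfl
  | cons v rest ih =>
    intro i
    simp only [aScan, idxF, ih]
    by_cases hv : v
    · subst hv
      by_cases hm : i ∈ solved <;> simp [hm]
    · simp at hv; subst hv; simp

theorem aScan_inc (solved : List Nat) : ∀ (l : List Bool) (i : Nat),
    (aScan solved l i).2.2 = idxF (fun _ v => !v) l i := by
  intro l; induction l with
  | nil => intro i; rfl
  | cons v rest ih =>
    intro i
    simp only [aScan, idxF, ih]
    by_cases hv : v
    · subst hv
      by_cases hm : i ∈ solved <;> simp [hm]
    · simp at hv; subst hv; simp

-- nsbc as a filter of range, with the membership test replaced by the getD predicate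
theorem nsbc_eq (xS xAE : List Bool) :
    (aScan (aSolved xS 0) xAE 0).2.1 = (List.range xAE.length).filter (cuB xS xAE) := by
  rw [aScan_nsbc, idxF_eq]
  simp only [Nat.zero_add]
  have hpt : ∀ k ∈ List.range xAE.length,
      (fun k => (xAE.getD k false && !(decide (k ∈ aSolved xS 0)))) k = cuB xS xAE k := by
    intro k _
    simp only [cuB]
    cases hx : xS.getD k false
    · rw [decide_eq_false (fun hm => Bool.false_ne_true (hx ▸ (mem_aSolved xS k).mp hm))]
    · rw [decide_eq_true ((mem_aSolved xS k).mpr hx)]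
  rw [List.filter_congr hpt]
  simp

theorem inc_eq (xS xAE : List Bool) :
    (aScan (aSolved xS 0) xAE 0).2.2 = (List.range xAE.length).filter (fun k => !(xAE.getD k false)) := by
  rw [aScan_inc, idxF_eq]
  simp

-- set-true folds: length and pointwise value
theorem foldl_set_length : ∀ (l : List Nat) (r : List Bool),
    (l.foldl (fun rd i => rd.set i true) r).length = r.length := by
  intro l; induction l with
  | nil => intro r; rfl
  | cons a l ih => intro r; rw [List.foldl_cons, ih, List.length_set]

theorem foldl_set_getD : ∀ (l : List Nat) (r : List Bool) (j : Nat), j < r.length →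
    (l.foldl (fun rd i => rd.set i true) r).getD j false = (r.getD j false || decide (j ∈ l)) := by
  intro l
  induction l with
  | nil => intro r j hj; simp
  | cons a l ih =>
    intro r j hj
    rw [List.foldl_cons, ih _ _ (by rwa [List.length_set])]
    by_cases hja : j = a
    · subst hja
      have hs : (r.set j true).getD j false = true := by
        rw [List.getD_eq_getElem _ _ (by rwa [List.length_set])]
        simp
      rw [hs]
      simp [List.mem_cons]
    · have hs : (r.set a true).getD j false = r.getD j false := by
        rw [List.getD_eq_getElem _ _ (by rwa [List.length_set]), List.getD_eq_getElem _ _ hj]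
        have hne : a ≠ j := fun h => hja h.symm
        simp [hne]
      rw [hs]
      simp [List.mem_cons, hja]

-- marking the first m elements of nsbc = membership in nsbc.take m
theorem map_range_getD (l : List Nat) (m : Nat) (hm : m ≤ l.length) :
    (List.range m).map (fun i => l.getD i 0) = l.take m := by
  apply List.ext_getElem
  · simp [hm]
  · intro i h1 h2
    simp only [List.getElem_map, List.getElem_range, List.getElem_take]
    rw [List.getD_eq_getElem]

-- membership in the m-prefix of a strictly increasing list
theorem mem_take_pairwise : ∀ (F : List Nat), F.Pairwise (· < ·) → ∀ (m j : Nat),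
    j ∈ F.take m ↔ j ∈ F ∧ F.countP (fun k => decide (k < j)) < m := by
  intro F
  induction F with
  | nil => intro _ m j; simp
  | cons a F ih =>
    intro hp m j
    have ha : ∀ b ∈ F, a < b := fun b hb => (List.pairwise_cons.mp hp).1 b hb
    have hF : F.Pairwise (· < ·) := (List.pairwise_cons.mp hp).2
    cases m with
    | zero => simp
    | succ m =>
      rw [List.take_succ_cons]
      by_cases hja : j = a
      · subst hja
        have h0 : F.countP (fun k => decide (k < j)) = 0 := by
          rw [List.countP_eq_zero]
          intro b hb
          simpa using Nat.le_of_lt (ha b hb)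
        simp [h0]
      · have hcnt : (a :: F).countP (fun k => decide (k < j)) =
            F.countP (fun k => decide (k < j)) + (if a < j then 1 else 0) := by
          rw [List.countP_cons]
          by_cases h : a < j
          · rw [if_pos (by simpa using h : decide (a < j) = true)]
            rw [if_pos h]
          · rw [if_neg (by simpa using h : ¬ decide (a < j) = true)]
            rw [if_neg h]
        constructor
        · intro h
          rcases List.mem_cons.mp h with h' | h'
          · exact absurd h' hja
          · obtain ⟨hm, hc⟩ := (ih hF m j).mp h'
            have : a < j := ha j hm
            refine ⟨List.mem_cons_of_mem _ hm, ?_⟩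
            rw [hcnt, if_pos this]; omega
        · rintro ⟨hm, hc⟩
          rcases List.mem_cons.mp hm with h' | h'
          · exact absurd h' hja
          · have haj : a < j := ha j h'
            rw [hcnt, if_pos haj] at hc
            exact List.mem_cons_of_mem _ ((ih hF m j).mpr ⟨h', by omega⟩)

theorem countP_lt_of_mem {F : List Nat} {j : Nat} (h : j ∈ F) :
    F.countP (fun k => decide (k < j)) < F.length := by
  rcases Nat.lt_or_ge (F.countP (fun k => decide (k < j))) F.length with h' | h'
  · exact h'
  · exfalso
    have hle := List.countP_le_length (l := F) (p := fun k => decide (k < j))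
    have heq : F.countP (fun k => decide (k < j)) = F.length := le_antisymm hle h'
    have := (List.countP_eq_length.mp heq) j h
    simp at this

-- countP over range n of (· < j && q ·) = countP over range j of q, for j ≤ n
theorem countP_range_trunc (q : Nat → Bool) (j : Nat) : ∀ (d : Nat),
    (List.range (j + d)).countP (fun k => decide (k < j) && q k) = (List.range j).countP q := by
  intro d
  induction d with
  | zero =>
    simp only [Nat.add_zero]
    apply List.countP_congr
    intro k hk
    simp [List.mem_range.mp hk]
  | succ d ih =>
    rw [← Nat.add_assoc, List.range_succ, List.countP_append, ih]
    have hlt : ¬ (j + d < j) := by omega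
    simp [hlt]

-- ===== A-side characterisation =====

theorem portA_eq_ref (xS xAE : List Bool) (maxBoxNo : Int) :
    get_index_of_boxes_for_reduction xS xAE maxBoxNo
      = (List.range xAE.length).map (fRef xS xAE maxBoxNo) := by
  unfold get_index_of_boxes_for_reduction
  simp only []
  set n := xAE.length with hn
  set nsbc := (aScan (aSolved xS 0) xAE 0).2.1 with hnsbc
  set incomplete := (aScan (aSolved xS 0) xAE 0).2.2 with hinc
  set nl : Int := max 0 (min (nsbc.length : Int) (maxBoxNo - (n : Int))) with hnl
  have hnsbc' : nsbc = (List.range n).filter (cuB xS xAE) := nsbc_eq xS xAE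
  have hinc' : incomplete = (List.range n).filter (fun k => !(xAE.getD k false)) := inc_eq xS xAE
  have hnlnat : nl.toNat = min nsbc.length (bud xAE maxBoxNo) := by
    simp only [hnl, bud]
    omega
  have hnle : nl.toNat ≤ nsbc.length := by omega
  -- rewrite the first marking loop as a fold over nsbc.take nl.toNat
  have hfold1 : (List.range nl.toNat).foldl (fun rd i => rd.set (nsbc.getD i 0) true)
        (List.replicate n false)
      = (nsbc.take nl.toNat).foldl (fun rd i => rd.set i true) (List.replicate n false) := by
    rw [← map_range_getD nsbc nl.toNat hnle, List.foldl_map]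
  rw [hfold1]
  apply List.ext_getElem
  · rw [foldl_set_length, foldl_set_length]; simp
  · intro j hj1 hj2
    have hjn : j < n := by
      rw [foldl_set_length, foldl_set_length] at hj1; simpa using hj1
    have hlen1 : ((nsbc.take nl.toNat).foldl (fun rd i => rd.set i true) (List.replicate n false)).length = n := by
      rw [foldl_set_length]; simp
    have hR : ((List.range n).map (fRef xS xAE maxBoxNo))[j]'hj2 = fRef xS xAE maxBoxNo j := by
      simp
    rw [hR, ← List.getD_eq_getElem _ false]
    rw [foldl_set_getD _ _ _ (by rw [hlen1]; exact hjn),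
        foldl_set_getD _ _ _ (by simp [hjn])]
    have h0 : (List.replicate n false).getD j false = false := by
      rw [List.getD_eq_getElem _ _ (by simpa using hjn)]
      simp
    rw [h0]
    simp only [Bool.false_or]
    -- now characterise the two memberships
    have hPW : nsbc.Pairwise (· < ·) := by
      rw [hnsbc']; exact (List.pairwise_lt_range).filter _
    have hmemnsbc : j ∈ nsbc ↔ cuB xS xAE j = true := by
      rw [hnsbc']; simp [List.mem_filter, hjn]
    have hcountn : nsbc.countP (fun k => decide (k < j)) = cnt xS xAE j := by
      rw [hnsbc', List.countP_filter, cnt]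
      have : n = j + (n - j) := by omega
      rw [this, countP_range_trunc (cuB xS xAE) j (n - j)]
    have htake : j ∈ nsbc.take nl.toNat ↔ (cuB xS xAE j = true ∧ cnt xS xAE j < bud xAE maxBoxNo) := by
      rw [mem_take_pairwise nsbc hPW, hcountn, hmemnsbc, hnlnat]
      constructor
      · rintro ⟨h1, h2⟩; exact ⟨h1, by omega⟩
      · rintro ⟨h1, h2⟩
        have := countP_lt_of_mem (hmemnsbc.mpr h1)
        rw [hcountn] at this
        exact ⟨h1, by omega⟩
    have hmeminc : j ∈ incomplete ↔ xAE.getD j false = false := by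
      rw [hinc']; simp [List.mem_filter, hjn]
    -- assemble
    simp only [fRef]
    by_cases hc : xAE.getD j false = true
    · have hni : j ∉ incomplete := by rw [hmeminc, hc]; simp
      rw [decide_eq_false hni, Bool.or_false, hc, Bool.not_true, Bool.false_or]
      by_cases ht : cuB xS xAE j = true ∧ cnt xS xAE j < bud xAE maxBoxNo
      · rw [decide_eq_true (htake.mpr ht), ht.1, Bool.true_and, decide_eq_true ht.2]
      · have hnt : j ∉ nsbc.take nl.toNat := fun h => ht (htake.mp h)
        rw [decide_eq_false hnt]
        rcases Decidable.em (cuB xS xAE j = true) with h1 | h1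
        · have h2 : ¬ cnt xS xAE j < bud xAE maxBoxNo := fun h2 => ht ⟨h1, h2⟩
          rw [h1, Bool.true_and, decide_eq_false h2]
        · have h1' : cuB xS xAE j = false := by revert h1; cases cuB xS xAE j <;> simp
          rw [h1', Bool.false_and]
    · have hc' : xAE.getD j false = false := by revert hc; cases xAE.getD j false <;> simp
      rw [decide_eq_true (hmeminc.mpr hc'), Bool.or_true, hc', Bool.not_false, Bool.true_or]

-- ===== B-side characterisation =====

theorem cnt_succ (xS xAE : List Bool) (i : Nat) :
    cnt xS xAE (i + 1) = cnt xS xAE i + (if cuB xS xAE i then 1 else 0) := by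
  simp only [cnt, List.range_succ, List.countP_append, List.countP_cons, List.countP_nil]
  by_cases h : cuB xS xAE i = true
  · simp [h]
  · simp [h]

theorem altGo_eq_ref (xS xAE : List Bool) (maxBoxNo : Int) : ∀ (l : List Bool) (i : Nat),
    l = xAE.drop i →
    altGo xS i ((bud xAE maxBoxNo : Int) - (min (cnt xS xAE i) (bud xAE maxBoxNo) : Int)) l
      = (List.range l.length).map (fun k => fRef xS xAE maxBoxNo (i + k)) := by
  intro l
  induction l with
  | nil => intro i _; simp [altGo]
  | cons v rest ih =>
    intro i hdrop
    have hlt : i < xAE.length := by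
      by_contra h
      rw [List.drop_eq_nil_of_le (by omega)] at hdrop
      exact List.cons_ne_nil v rest hdrop
    have hv : xAE.getD i false = v := by
      have h1 : xAE[i]? = some v := by rw [← List.head?_drop, ← hdrop]; rfl
      rw [List.getD_eq_getElem?_getD, h1]; rfl
    have hrest : rest = xAE.drop (i + 1) := by
      have : xAE.drop (i + 1) = (xAE.drop i).drop 1 := by rw [List.drop_drop, Nat.add_comm]
      rw [this, ← hdrop]; rfl
    have hrange : (List.range (rest.length + 1)).map (fun k => fRef xS xAE maxBoxNo (i + k))
        = fRef xS xAE maxBoxNo i :: (List.range rest.length).map (fun k => fRef xS xAE maxBoxNo (i + 1 + k)) := by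
      rw [List.range_succ_eq_map, List.map_cons, List.map_map]
      congr 1
      apply List.map_congr_left
      intro k _
      simp [Function.comp]
      congr 1
      omega
    set B := bud xAE maxBoxNo with hB
    rw [altGo, List.length_cons, hrange]
    by_cases hvv : v
    · subst hvv
      simp only [Bool.not_true, Bool.false_eq_true, if_false]
      by_cases hcu : cuB xS xAE i
      · -- complete and unsolved: the elif condition's solved-test holds
        have hsolv : xS.getD i false = false := by
          have := hcu; simp only [cuB, hv] at this; simpa using this
        have hcond : (decide (xS.length ≤ i) || !(xS.getD i false)) = true := by
          rw [hsolv]; simp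
        by_cases hb : cnt xS xAE i < B
        · have hbpos : (0:Int) < (B : Int) - (min (cnt xS xAE i) B : Int) := by omega
          rw [hcond]
          simp only [Bool.true_and, decide_eq_true_eq, if_pos hbpos]
          have harith : ((B : Int) - (min (cnt xS xAE i) B : Int)) - 1
              = (B : Int) - (min (cnt xS xAE (i + 1)) B : Int) := by
            rw [cnt_succ, if_pos hcu]; omega
          rw [harith, ih (i + 1) hrest]
          congr 1
          simp only [fRef, hv, hcu, Bool.not_true, Bool.true_and, Bool.false_or]
          simp [show cnt xS xAE i < bud xAE maxBoxNo from hb]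
        · have hbz : ¬ ((0:Int) < (B : Int) - (min (cnt xS xAE i) B : Int)) := by omega
          rw [hcond]
          simp only [Bool.true_and, decide_eq_true_eq, if_neg hbz]
          have harith : ((B : Int) - (min (cnt xS xAE i) B : Int))
              = (B : Int) - (min (cnt xS xAE (i + 1)) B : Int) := by
            rw [cnt_succ, if_pos hcu]; omega
          rw [harith, ih (i + 1) hrest]
          congr 1
          simp only [fRef, hv, hcu, Bool.not_true, Bool.true_and, Bool.false_or]
          simp [show ¬ cnt xS xAE i < bud xAE maxBoxNo from hb]
      · -- complete but solved: elif condition fails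
        have hsolv : xS.getD i false = true := by
          by_contra h
          apply hcu
          simp only [cuB, hv]
          simp [Bool.not_eq_true] at h
          simp [h]
        have hxl : i < xS.length := by
          by_contra h
          rw [List.getD_eq_default _ _ (by omega)] at hsolv
          exact Bool.false_ne_true hsolv
        have hcond : (decide (xS.length ≤ i) || !(xS.getD i false)) = false := by
          rw [hsolv]; simp; omega
        rw [hcond]
        simp only [Bool.false_and, Bool.false_eq_true, if_false]
        have harith : ((B : Int) - (min (cnt xS xAE i) B : Int))
            = (B : Int) - (min (cnt xS xAE (i + 1)) B : Int) := by
          rw [cnt_succ, if_neg hcu]; omega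
        rw [harith, ih (i + 1) hrest]
        congr 1
        simp only [fRef, hv, Bool.not_true, Bool.false_or]
        simp only [Bool.not_eq_true] at hcu
        simp [hcu]
    · simp only [Bool.not_eq_true] at hvv; subst hvv
      simp only [Bool.not_false, if_true]
      have harith : ((B : Int) - (min (cnt xS xAE i) B : Int))
          = (B : Int) - (min (cnt xS xAE (i + 1)) B : Int) := by
        have hcu0 : cuB xS xAE i = false := by simp only [cuB, hv, Bool.false_and]
        rw [cnt_succ, if_neg (by simp [hcu0])]; omega
      rw [harith, ih (i + 1) hrest]
      congr 1
      simp only [fRef, hv, Bool.not_false, Bool.true_or]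

theorem portB_eq_ref (xS xAE : List Bool) (maxBoxNo : Int) :
    get_index_of_boxes_for_reduction_alt xS xAE maxBoxNo
      = (List.range xAE.length).map (fRef xS xAE maxBoxNo) := by
  unfold get_index_of_boxes_for_reduction_alt
  have h0 : max 0 (maxBoxNo - (xAE.length : Int))
      = (bud xAE maxBoxNo : Int) - (min (cnt xS xAE 0) (bud xAE maxBoxNo) : Int) := by
    simp only [bud, cnt, List.range_zero, List.countP_nil]
    omega
  rw [h0, altGo_eq_ref xS xAE maxBoxNo xAE 0 rfl]
  simp

-- ===== VERDICT (by name: the statement is the Claim_ definition above) =====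
theorem get_index_of_boxes_for_reduction_spec : Claim_equal_get_index_of_boxes_for_reduction := by
  intro xS xAE maxBoxNo _
  unfold Spec_get_index_of_boxes_for_reduction
  rw [portA_eq_ref, portB_eq_ref]
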